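-- pv_equiv track=rewrite | github.com/lucasgameiroborges/Python-lista-2--CES-22 | wordtools.py | has_dashdash
-- ===== SOURCE A (Python) =====
-- def has_dashdash(str):
--     flag1 = False
--     flag2 = False
--
--     for character in str:
--         if character == '-':
--             if not flag1:
--                 flag1 = True
--             else:
--                 flag2 = True
--         else:
--             flag1 = False
--
--     return flag2
-- ===== SOURCE B (Python) =====
-- def has_dashdash(str):
--     return any(a == '-' and b == '-' for a, b in zip(str, str[1:]))
-- ===== Notes on version B (the rewrite author's own statement) =====
-- stated objective: idiomatic
-- what changed: Replaces the two-flag state machine carried across the loop with a direct pairwise scan of adjacent characters via zip(str, str[1:]).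
import Mathlib
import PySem

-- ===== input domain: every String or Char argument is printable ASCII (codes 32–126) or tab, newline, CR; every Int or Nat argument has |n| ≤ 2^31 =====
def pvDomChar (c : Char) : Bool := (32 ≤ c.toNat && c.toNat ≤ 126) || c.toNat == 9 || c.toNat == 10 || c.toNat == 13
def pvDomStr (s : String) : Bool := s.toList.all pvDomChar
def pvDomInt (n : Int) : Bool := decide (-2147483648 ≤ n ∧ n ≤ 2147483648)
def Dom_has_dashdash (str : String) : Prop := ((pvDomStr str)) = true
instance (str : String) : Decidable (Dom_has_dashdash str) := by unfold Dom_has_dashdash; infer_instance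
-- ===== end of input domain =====

-- B replaces A's two-flag state machine with a pairwise scan of adjacent characters (idiomatic).

-- ===== PORT A =====
-- the loop body of A, step for step: flag1/flag2 carried as a pair
def hdStep (st : Bool × Bool) (character : Char) : Bool × Bool :=
  if character = '-' then
    if !st.1 then (true, st.2) else (st.1, true)
  else
    (false, st.2)

def has_dashdash (str : String) : Bool :=
  (str.toList.foldl hdStep (false, false)).2

-- ===== PORT B =====
-- zip(str, str[1:]) and any(a == '-' and b == '-')
def has_dashdash_alt (str : String) : Bool :=
  (str.toList.zip (PySem.List.slice str.toList (some 1) none)).any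
    (fun p => p.1 == '-' && p.2 == '-')

-- ===== PRECONDITION & SPEC =====
def Spec_has_dashdash (str : String) (out : Bool) : Prop := out = has_dashdash_alt str
instance (str : String) (out : Bool) : Decidable (Spec_has_dashdash str out) := by unfold Spec_has_dashdash; infer_instance

-- ===== CLAIM (what is proved, stated in full; the proofs are below) =====
def Claim_equal_has_dashdash : Prop := ∀ (str : String), Dom_has_dashdash str → Spec_has_dashdash str (has_dashdash str)

-- ===== LEMMAS AND PROOFS =====

def pairDash : List Char → Bool
  | [] => false
  | _ :: [] => false
  | a :: b :: t => (a = '-' && b = '-') || pairDash (b :: t)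

lemma hd_invariant (l : List Char) : ∀ (f1 f2 : Bool),
    (l.foldl hdStep (f1, f2)).2
      = (f2 || (f1 && (l.head? == some '-')) || pairDash l) := by
  induction l with
  | nil => intro f1 f2; simp [pairDash]
  | cons c t ih =>
    intro f1 f2
    by_cases hc : c = '-'
    · cases f1 with
      | false =>
        simp only [List.foldl, hdStep, if_pos hc, ih]
        cases t with
        | nil => simp [pairDash]
        | cons b t' =>
          simp only [pairDash, hc]
          by_cases hb : b = '-'
          · simp [hb]
          · simp [hb, beq_eq_false_iff_ne.mpr hb]
      | true =>
        simp only [List.foldl, hdStep, if_pos hc, ih]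
        subst hc
        cases t with
        | nil => simp [pairDash]
        | cons b t' => simp [pairDash]
    · simp only [List.foldl, hdStep, if_neg hc, ih]
      cases t with
      | nil => simp [pairDash, beq_eq_false_iff_ne.mpr hc]
      | cons b t' => simp [pairDash, hc, beq_eq_false_iff_ne.mpr hc]


lemma pairDash_eq_zip (l : List Char) :
    (l.zip l.tail).any (fun p => p.1 == '-' && p.2 == '-') = pairDash l := by
  induction l with
  | nil => simp [pairDash]
  | cons a t ih =>
    cases t with
    | nil => simp [pairDash]
    | cons b t' =>
      simp only [pairDash, List.tail_cons, List.zip_cons_cons, List.any_cons]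
      rw [← ih]
      simp only [List.tail_cons]
      by_cases ha : a = '-' <;> by_cases hb : b = '-' <;> simp [ha, hb]

-- ===== VERDICT (by name: the statement is the Claim_ definition above) =====
theorem has_dashdash_spec : Claim_equal_has_dashdash := by
  intro str _
  unfold Spec_has_dashdash has_dashdash has_dashdash_alt
  rw [hd_invariant, PySem.List.slice_from_one, pairDash_eq_zip]
  simp
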